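-- pv_equiv track=rewrite | github.com/rorschach-28/parcial_sexo | package_biblia/biblia_de_funciones.py | cortar_iterable
-- ===== SOURCE A (Python) =====
-- def cortar_iterable(iterable:str|list, desde:int, hasta:int)->str|list:
--     """
--     Esta función recorta un iterable según las posiciones que se le
--     pasen por parametro (0, n). Entre esas dos posiciones (inclusive)
--     es que se recortara el iterable.
--     Recibe: El iterable y las posiciones en las que queremos cortar
--     Retorna: El iterable recortado
--     """
--     contador = 0
--     if type(iterable) == list:
--         resultado = []
--         for letra in iterable:
--             if contador >= desde and contador <= hasta:
--                 resultado += [letra]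
--             contador += 1
--     else:
--         resultado = ""
--         for letra in iterable:
--             if contador >= desde and contador <= hasta:
--                 resultado += letra
--             contador += 1
--
--     return resultado
-- ===== SOURCE B (Python) =====
-- def cortar_iterable(iterable, desde, hasta):
--     lo = max(desde, 0)
--     stop = max(hasta + 1, 0)
--     return iterable[lo:stop]
-- ===== Notes on version B (the rewrite author's own statement) =====
-- stated objective: simpler
-- what changed: Replaces the counter-and-append filtering loop with a single closed-form slice iterable[max(desde,0):max(hasta+1,0)], which also removes the list-vs-str type branch.
import Mathlib
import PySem

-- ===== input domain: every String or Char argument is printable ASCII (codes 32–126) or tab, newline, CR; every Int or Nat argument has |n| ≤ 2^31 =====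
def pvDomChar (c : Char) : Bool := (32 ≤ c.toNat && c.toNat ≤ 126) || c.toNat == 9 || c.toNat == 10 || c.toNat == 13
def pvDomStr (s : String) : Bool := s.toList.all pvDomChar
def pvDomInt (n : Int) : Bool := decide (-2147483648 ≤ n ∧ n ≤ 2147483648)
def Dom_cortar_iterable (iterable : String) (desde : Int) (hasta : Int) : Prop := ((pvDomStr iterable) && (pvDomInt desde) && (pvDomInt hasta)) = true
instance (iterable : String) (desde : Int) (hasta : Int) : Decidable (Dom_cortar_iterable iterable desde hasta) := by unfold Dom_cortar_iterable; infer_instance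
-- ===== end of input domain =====

-- B replaces A's counter-filtering loop by one closed-form clamped slice (objective: simpler).

-- ===== PORT A =====
-- A's for-loop: counter starts at 0, each char is appended iff desde <= contador <= hasta.
def cortarLoopA (desde hasta : Int) : List Char → Int → List Char → List Char
  | [], _, resultado => resultado
  | letra :: rest, contador, resultado =>
      cortarLoopA desde hasta rest (contador + 1)
        (if contador ≥ desde ∧ contador ≤ hasta then resultado ++ [letra] else resultado)

def cortar_iterable (iterable : String) (desde : Int) (hasta : Int) : String :=
  String.ofList (cortarLoopA desde hasta iterable.toList 0 [])

-- ===== PORT B =====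
-- Source B: return iterable[max(desde,0):max(hasta+1,0)]
def cortar_iterable_alt (iterable : String) (desde : Int) (hasta : Int) : String :=
  String.ofList (PySem.List.slice iterable.toList (some (max desde 0)) (some (max (hasta + 1) 0)))

-- ===== PRECONDITION & SPEC =====
def Spec_cortar_iterable (iterable : String) (desde : Int) (hasta : Int) (out : String) : Prop := out = cortar_iterable_alt iterable desde hasta
instance (iterable : String) (desde : Int) (hasta : Int) (out : String) : Decidable (Spec_cortar_iterable iterable desde hasta out) := by unfold Spec_cortar_iterable; infer_instance

-- ===== CLAIM (what is proved, stated in full; the proofs are below) =====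
def Claim_equal_cortar_iterable : Prop := ∀ (iterable : String) (desde : Int) (hasta : Int), Dom_cortar_iterable iterable desde hasta → Spec_cortar_iterable iterable desde hasta (cortar_iterable iterable desde hasta)

-- ===== LEMMAS AND PROOFS =====

/-- Closed form for A's loop: the elements at counter positions in [desde, hasta]. -/
def cortarSel (desde hasta : Int) (l : List Char) (c : Int) : List Char :=
  (l.drop (desde - c).toNat).take ((hasta + 1 - c).toNat - (desde - c).toNat)

theorem cortarSel_cons (desde hasta : Int) (ch : Char) (rest : List Char) (c : Int) :
    cortarSel desde hasta (ch :: rest) c =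
      (if c ≥ desde ∧ c ≤ hasta then [ch] else []) ++ cortarSel desde hasta rest (c + 1) := by
  unfold cortarSel
  by_cases hd : desde ≤ c
  · have h0 : (desde - c).toNat = 0 := by omega
    have h0' : (desde - (c + 1)).toNat = 0 := by omega
    by_cases hh : c ≤ hasta
    · have hk : (hasta + 1 - c).toNat = (hasta + 1 - (c + 1)).toNat + 1 := by omega
      simp [h0, h0', hk, hd, hh, List.take_succ_cons]
    · have hk : (hasta + 1 - c).toNat = 0 := by omega
      have hk' : (hasta + 1 - (c + 1)).toNat = 0 := by omega
      simp [h0, h0', hk, hh]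
      omega
  · have h1 : (desde - c).toNat = (desde - (c + 1)).toNat + 1 := by omega
    have h2 : (hasta + 1 - c).toNat - (desde - c).toNat
        = (hasta + 1 - (c + 1)).toNat - (desde - (c + 1)).toNat := by omega
    simp [h1, hd]
    omega

theorem cortarLoopA_eq (desde hasta : Int) :
    ∀ (l : List Char) (c : Int) (acc : List Char),
      cortarLoopA desde hasta l c acc = acc ++ cortarSel desde hasta l c := by
  intro l
  induction l with
  | nil => intro c acc; simp [cortarLoopA, cortarSel]
  | cons ch rest ih =>
      intro c acc
      rw [cortarLoopA, ih, cortarSel_cons]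
      split_ifs with h
      · simp
      · simp

theorem cortar_iterable_spec : Claim_equal_cortar_iterable := by
  intro iterable desde hasta _
  unfold Spec_cortar_iterable cortar_iterable cortar_iterable_alt
  rw [cortarLoopA_eq]
  have ha : max desde 0 = ((desde.toNat : Nat) : Int) := by omega
  have hb : max (hasta + 1) 0 = (((hasta + 1).toNat : Nat) : Int) := by omega
  rw [ha, hb, PySem.List.slice_natCast]
  unfold cortarSel
  have h1 : (desde - 0).toNat = desde.toNat := by omega
  have h2 : (hasta + 1 - 0).toNat = (hasta + 1).toNat := by omega
  rw [h1, h2]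
  simp
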